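-- pv_equiv track=rewrite | github.com/NaayoungKwon/AlgorithmStudy | 백준/Gold/21610. 마법사 상어와 비바라기/마법사 상어와 비바라기.py | find_new_cur
-- ===== SOURCE A (Python) =====
-- def find_new_cur(n, x, y):
--     while x < 0:
--         x += n
--     if x >= n:
--         x = (x % n)
--
--     while y < 0:
--         y += n
--     if y >= n:
--         y = (y % n)
--
--     return (x,y)
-- ===== SOURCE B (Python) =====
-- def find_new_cur(n, x, y):
--     return (x % n, y % n)
-- ===== Notes on version B (the rewrite author's own statement) =====
-- stated objective: simpler
-- what changed: Replaces the per-coordinate normalize-by-repeated-addition while-loops plus conditional modulo with a single closed-form floored modulo per coordinate.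
import Mathlib
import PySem

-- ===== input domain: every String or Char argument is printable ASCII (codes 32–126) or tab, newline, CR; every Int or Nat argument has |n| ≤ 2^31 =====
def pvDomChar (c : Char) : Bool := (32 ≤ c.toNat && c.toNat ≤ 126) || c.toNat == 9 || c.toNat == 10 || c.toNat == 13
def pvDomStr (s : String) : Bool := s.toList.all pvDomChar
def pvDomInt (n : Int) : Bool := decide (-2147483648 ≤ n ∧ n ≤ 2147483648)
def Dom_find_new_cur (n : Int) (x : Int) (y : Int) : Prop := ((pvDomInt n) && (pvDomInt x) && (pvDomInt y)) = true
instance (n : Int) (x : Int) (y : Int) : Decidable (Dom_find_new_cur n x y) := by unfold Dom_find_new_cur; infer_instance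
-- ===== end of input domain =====

-- B replaces each while-loop-plus-conditional-modulo with one closed-form floored modulo (simpler).

-- ===== PORT A =====
-- literal port of 'while x < 0: x += n'; the extra '0 < n' in the guard only makes the
-- recursion total (for n ≤ 0 Python's loop diverges; those inputs are outside Pre_)
def pvWhileAdd (n : Int) (x : Int) : Int :=
  if _h : x < 0 ∧ 0 < n then pvWhileAdd n (x + n) else x
termination_by (-x).toNat
decreasing_by omega

def find_new_cur (n : Int) (x : Int) (y : Int) : Int × Int :=
  let x := pvWhileAdd n x
  let x := if x ≥ n then PySem.Int.mod x n else x
  let y := pvWhileAdd n y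
  let y := if y ≥ n then PySem.Int.mod y n else y
  (x, y)

-- ===== PORT B =====
def find_new_cur_alt (n : Int) (x : Int) (y : Int) : Int × Int :=
  (PySem.Int.mod x n, PySem.Int.mod y n)

-- ===== PRECONDITION & SPEC =====
-- Pre_ excludes exactly the inputs on which A does not return: n = 0 (ZeroDivisionError or
-- infinite loop) and n < 0 with a negative coordinate (the while loop diverges).
def Pre_find_new_cur (n : Int) (x : Int) (y : Int) : Prop :=
  0 < n ∨ (n < 0 ∧ 0 ≤ x ∧ 0 ≤ y)
instance (n : Int) (x : Int) (y : Int) : Decidable (Pre_find_new_cur n x y) := by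
  unfold Pre_find_new_cur; infer_instance

def pvWitness_find_new_cur : Int × Int × Int := (5, -7, 3)

def Spec_find_new_cur (n : Int) (x : Int) (y : Int) (out : Int × Int) : Prop := out = find_new_cur_alt n x y
instance (n : Int) (x : Int) (y : Int) (out : Int × Int) : Decidable (Spec_find_new_cur n x y out) := by unfold Spec_find_new_cur; infer_instance

-- ===== CLAIM (what is proved, stated in full; the proofs are below) =====
def Claim_equal_find_new_cur : Prop := ∀ (n : Int) (x : Int) (y : Int), Dom_find_new_cur n x y → Pre_find_new_cur n x y → Spec_find_new_cur n x y (find_new_cur n x y)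

-- ===== LEMMAS AND PROOFS =====

theorem pvWhileAdd_nonneg (n x : Int) (hn : 0 < n) : 0 ≤ pvWhileAdd n x := by
  induction x using pvWhileAdd.induct n with
  | case1 x h ih => rw [pvWhileAdd, dif_pos h]; exact ih
  | case2 x h => rw [pvWhileAdd, dif_neg h]; omega

theorem pvWhileAdd_mod (n x : Int) (hn : 0 < n) :
    PySem.Int.mod (pvWhileAdd n x) n = PySem.Int.mod x n := by
  induction x using pvWhileAdd.induct n with
  | case1 x h ih =>
      rw [pvWhileAdd, dif_pos h]
      rw [ih, PySem.Int.mod_eq_emod_of_pos hn, PySem.Int.mod_eq_emod_of_pos hn,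
        Int.add_emod_right]
  | case2 x h => rw [pvWhileAdd, dif_neg h]

theorem pvWhileAdd_of_nonneg (n x : Int) (hx : 0 ≤ x) : pvWhileAdd n x = x := by
  rw [pvWhileAdd, dif_neg (by omega)]

-- one coordinate: A's normalization equals the closed-form floored modulo on Pre_
theorem pvCoord (n x : Int) (h : 0 < n ∨ (n < 0 ∧ 0 ≤ x)) :
    (if pvWhileAdd n x ≥ n then PySem.Int.mod (pvWhileAdd n x) n else pvWhileAdd n x)
      = PySem.Int.mod x n := by
  rcases h with hn | ⟨hn, hx⟩
  · split_ifs with hge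
    · exact pvWhileAdd_mod n x hn
    · have h0 := pvWhileAdd_nonneg n x hn
      have := pvWhileAdd_mod n x hn
      rw [PySem.Int.mod_eq_emod_of_pos hn] at this
      rw [← this, Int.emod_eq_of_lt h0 (by omega)]
  · rw [pvWhileAdd_of_nonneg n x hx, if_pos (by omega)]

-- ===== VERDICT (by name: the statement is the Claim_ definition above) =====
theorem find_new_cur_spec : Claim_equal_find_new_cur := by
  intro n x y _ hpre
  show find_new_cur n x y = find_new_cur_alt n x y
  unfold find_new_cur find_new_cur_alt
  have hx : 0 < n ∨ (n < 0 ∧ 0 ≤ x) := by unfold Pre_find_new_cur at hpre; tauto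
  have hy : 0 < n ∨ (n < 0 ∧ 0 ≤ y) := by unfold Pre_find_new_cur at hpre; tauto
  simp only [pvCoord n x hx, pvCoord n y hy]
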